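-- pv_equiv track=rewrite | github.com/mmzhao/corc | src/corc/blacklist.py | _find_section_end
-- ===== SOURCE A (Python) =====
-- def _find_section_end(lines: list[str], section_name: str) -> int | None:
--     """Find the line index where content should be inserted at end of a section.
--
--     Returns the index of the line just before the next heading of same or
--     higher level, or the end of file if no subsequent heading.
--     Returns None if the section is not found.
--     """
--     section_slug = section_name.lower().replace(" ", "-").replace(":", "")
--     in_section = False
--     section_level = 0
--     last_content_idx = None
--
--     for i, line in enumerate(lines):
--         if line.startswith("#"):
--             level = len(line) - len(line.lstrip("#"))
--             heading_text = line.lstrip("#").strip()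
--             slug = (
--                 heading_text.lower()
--                 .replace(" ", "-")
--                 .replace(":", "")
--                 .replace("(", "")
--                 .replace(")", "")
--             )
--
--             if not in_section and section_slug in slug:
--                 in_section = True
--                 section_level = level
--                 last_content_idx = i + 1
--                 continue
--
--             if in_section and level <= section_level:
--                 # Found next section — insert before it
--                 return last_content_idx if last_content_idx is not None else i
--
--         if in_section:
--             last_content_idx = i + 1
--
--     if in_section and last_content_idx is not None:
--         return last_content_idx
--
--     return None
-- ===== SOURCE B (Python) =====
-- def _find_section_end(lines: list[str], section_name: str) -> int | None:
--     """Build a heading table once, then answer both queries on the table."""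
--     target = section_name.lower().replace(" ", "-").replace(":", "")
--     headings = [
--         (
--             i,
--             len(line) - len(line.lstrip("#")),
--             line.lstrip("#").strip().lower()
--             .replace(" ", "-").replace(":", "")
--             .replace("(", "").replace(")", ""),
--         )
--         for i, line in enumerate(lines)
--         if line.startswith("#")
--     ]
--     start = next(((i, lvl) for i, lvl, slug in headings if target in slug), None)
--     if start is None:
--         return None
--     s, level = start
--     return next((i for i, lvl, _ in headings if i > s and lvl <= level), len(lines))
-- ===== Notes on version B (the rewrite author's own statement) =====
-- stated objective: alternative
-- what changed: A does one stateful line-by-line scan carrying in_section/section_level/last_content_idx; B first builds a heading table [(index, level, slug)] by a comprehension over enumerate(lines) and then answers both queries with next() over that table (find the matching heading, then the first table entry with a later index and level <= it, defaulting to len(lines)), so no per-line loop state exists.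
import Mathlib
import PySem

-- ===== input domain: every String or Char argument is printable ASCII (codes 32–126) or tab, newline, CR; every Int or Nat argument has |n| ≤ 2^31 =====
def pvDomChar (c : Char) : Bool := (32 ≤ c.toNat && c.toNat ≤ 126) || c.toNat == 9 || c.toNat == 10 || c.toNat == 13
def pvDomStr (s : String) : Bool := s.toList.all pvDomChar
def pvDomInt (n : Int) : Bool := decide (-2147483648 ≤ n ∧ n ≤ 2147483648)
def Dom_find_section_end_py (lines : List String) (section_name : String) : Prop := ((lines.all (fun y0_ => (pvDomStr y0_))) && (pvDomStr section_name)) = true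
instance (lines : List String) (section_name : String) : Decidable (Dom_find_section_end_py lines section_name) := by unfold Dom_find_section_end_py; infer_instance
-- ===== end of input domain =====

-- B replaces A's single stateful line-by-line scan (in_section flag, section_level, last_content_idx)
-- by building a heading table (index, level, slug) once and answering both queries on that table;
-- same values everywhere, objective: alternative (a derived data structure instead of carried loop state).

-- ===== PORT A =====
-- section_name.lower().replace(" ", "-").replace(":", "")
def pvTargetA (section_name : String) : List Char :=
  PySem.Chars.replace (PySem.Chars.replace (PySem.Chars.lower section_name.toList) [' '] ['-']) [':'] []

-- heading_text.lower().replace(" ", "-").replace(":", "").replace("(", "").replace(")", "")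
def pvHeadSlugA (t : List Char) : List Char :=
  PySem.Chars.replace (PySem.Chars.replace (PySem.Chars.replace (PySem.Chars.replace
    (PySem.Chars.lower t) [' '] ['-']) [':'] []) ['('] []) [')'] []

-- line.lstrip("#") = drop the leading '#' characters (exact: lstrip with a one-char set)
def pvLstripHash (cs : List Char) : List Char := cs.dropWhile (· == '#')

-- the for-loop of A: state (i, in_section, section_level, last_content_idx); early return on "next section"
def pvLoopA (sl : List Char) : List String → Nat → Bool → Int → Option Nat → Option Nat
  | [], _, ins, _, lci => if ins && lci.isSome then lci else none
  | l :: rest, i, ins, lvl, lci =>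
    let cs := l.toList
    if PySem.Chars.startswith cs ['#'] then
      let stripped := pvLstripHash cs
      let level : Int := ((cs.length - stripped.length : Nat) : Int)
      let slug := pvHeadSlugA (PySem.Chars.strip stripped)
      if !ins && PySem.Chars.isIn sl slug then
        pvLoopA sl rest (i+1) true level (some (i+1))
      else if ins && decide (level ≤ lvl) then
        (if lci.isSome then lci else some i)
      else if ins then pvLoopA sl rest (i+1) ins lvl (some (i+1))
      else pvLoopA sl rest (i+1) ins lvl lci
    else if ins then pvLoopA sl rest (i+1) ins lvl (some (i+1))
    else pvLoopA sl rest (i+1) ins lvl lci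

def find_section_end_py (lines : List String) (section_name : String) : Option Int :=
  (pvLoopA (pvTargetA section_name) lines 0 false 0 none).map (fun n => (n : Int))

-- ===== PORT B =====
def pvTargetB (section_name : String) : List Char :=
  PySem.Chars.replace (PySem.Chars.replace (PySem.Chars.lower section_name.toList) [' '] ['-']) [':'] []

def pvHeadSlugB (t : List Char) : List Char :=
  PySem.Chars.replace (PySem.Chars.replace (PySem.Chars.replace (PySem.Chars.replace
    (PySem.Chars.lower t) [' '] ['-']) [':'] []) ['('] []) [')'] []

def pvLstripHashB (cs : List Char) : List Char := cs.dropWhile (· == '#')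

-- the heading-table comprehension: [(i, level, slug) for i, line in enumerate(lines) if line.startswith("#")]
def pvHeads (lines : List String) : List (Int × Int × List Char) :=
  (PySem.List.enumerate lines 0).filterMap (fun p =>
    let cs := p.2.toList
    if PySem.Chars.startswith cs ['#'] then
      some (p.1, ((cs.length - (pvLstripHashB cs).length : Nat) : Int),
            pvHeadSlugB (PySem.Chars.strip (pvLstripHashB cs)))
    else none)

def find_section_end_py_alt (lines : List String) (section_name : String) : Option Int :=
  let target := pvTargetB section_name
  let headings := pvHeads lines
  -- next(((i, lvl) for i, lvl, slug in headings if target in slug), None)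
  match headings.find? (fun e => PySem.Chars.isIn target e.2.2) with
  | none => none
  | some (s, level, _) =>
    -- next((i for i, lvl, _ in headings if i > s and lvl <= level), len(lines))
    match headings.find? (fun e => decide (s < e.1) && decide (e.2.1 ≤ level)) with
    | some e => some e.1
    | none => some ((lines.length : Nat) : Int)

-- ===== PRECONDITION & SPEC =====
def Spec_find_section_end_py (lines : List String) (section_name : String) (out : Option Int) : Prop := out = find_section_end_py_alt lines section_name
instance (lines : List String) (section_name : String) (out : Option Int) : Decidable (Spec_find_section_end_py lines section_name out) := by unfold Spec_find_section_end_py; infer_instance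

-- ===== CLAIM (what is proved, stated in full; the proofs are below) =====
def Claim_equal_find_section_end_py : Prop := ∀ (lines : List String) (section_name : String), Dom_find_section_end_py lines section_name → Spec_find_section_end_py lines section_name (find_section_end_py lines section_name)

-- ===== LEMMAS AND PROOFS =====

-- the two ports' slug helpers are the same transformation
theorem pvSlug_eq : pvHeadSlugA = pvHeadSlugB := rfl
theorem pvLstrip_eq : pvLstripHash = pvLstripHashB := rfl
theorem pvTarget_eq : pvTargetA = pvTargetB := rfl

-- proof-side intermediate forms (used only in the lemmas below)
-- first heading (from position i) whose slug contains the target; returns (index, level)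
def pvFind1 (tgt : List Char) : List String → Nat → Option (Nat × Int)
  | [], _ => none
  | l :: rest, i =>
    let cs := l.toList
    if PySem.Chars.startswith cs ['#'] then
      if PySem.Chars.isIn tgt (pvHeadSlugB (PySem.Chars.strip (pvLstripHashB cs))) then
        some (i, ((cs.length - (pvLstripHashB cs).length : Nat) : Int))
      else pvFind1 tgt rest (i+1)
    else pvFind1 tgt rest (i+1)

-- first heading (from position j) of level ≤ lvl, else n
def pvFind2 (lvl : Int) (n : Nat) : List String → Nat → Nat
  | [], _ => n
  | l :: rest, j =>
    let cs := l.toList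
    if PySem.Chars.startswith cs ['#'] &&
       decide (((cs.length - (pvLstripHashB cs).length : Nat) : Int) ≤ lvl) then j
    else pvFind2 lvl n rest (j+1)

-- the heading table of a line suffix starting at (Int) position i, recursive form
def pvHeadsAux : List String → Int → List (Int × Int × List Char)
  | [], _ => []
  | l :: rest, i =>
    let cs := l.toList
    if PySem.Chars.startswith cs ['#'] then
      (i, ((cs.length - (pvLstripHashB cs).length : Nat) : Int),
        pvHeadSlugB (PySem.Chars.strip (pvLstripHashB cs))) :: pvHeadsAux rest (i+1)
    else pvHeadsAux rest (i+1)

theorem pvHeadsAux_eq_filterMap : ∀ (lines : List String) (i : Int),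
    pvHeadsAux lines i = (PySem.List.enumerate lines i).filterMap (fun p =>
      let cs := p.2.toList
      if PySem.Chars.startswith cs ['#'] then
        some (p.1, ((cs.length - (pvLstripHashB cs).length : Nat) : Int),
              pvHeadSlugB (PySem.Chars.strip (pvLstripHashB cs)))
      else none) := by
  intro lines
  induction lines with
  | nil => intro i; simp [pvHeadsAux, PySem.List.enumerate_nil]
  | cons l rest ih =>
    intro i
    rw [PySem.List.enumerate_cons]
    by_cases hs : PySem.Chars.startswith l.toList ['#'] = true
    · simp [pvHeadsAux, hs, ih]
    · rw [Bool.not_eq_true] at hs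
      simp [pvHeadsAux, hs, ih]

theorem pvHeads_eq (lines : List String) : pvHeads lines = pvHeadsAux lines 0 :=
  (pvHeadsAux_eq_filterMap lines 0).symm

-- index bounds of the table entries
theorem pvHeadsAux_bounds : ∀ (xs : List String) (i : Int) (e : Int × Int × List Char),
    e ∈ pvHeadsAux xs i → i ≤ e.1 ∧ e.1 < i + xs.length := by
  intro xs
  induction xs with
  | nil => intro i e h; simp [pvHeadsAux] at h
  | cons l rest ih =>
    intro i e h
    simp only [pvHeadsAux] at h
    split_ifs at h
    · rcases List.mem_cons.mp h with h | h
      · subst h; simp only [List.length_cons]; push_cast; omega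
      · have := ih (i+1) e h
        simp only [List.length_cons]; push_cast at this ⊢; omega
    · have := ih (i+1) e h
      simp only [List.length_cons]; push_cast at this ⊢; omega

-- splitting the table at a line split
theorem pvHeadsAux_append : ∀ (xs ys : List String) (i : Int),
    pvHeadsAux (xs ++ ys) i = pvHeadsAux xs i ++ pvHeadsAux ys (i + xs.length) := by
  intro xs
  induction xs with
  | nil => intro ys i; simp [pvHeadsAux]
  | cons l rest ih =>
    intro ys i
    have harith : i + 1 + (rest.length : Int) = i + ((l :: rest).length : Int) := by
      simp only [List.length_cons]; push_cast; ring
    simp only [List.cons_append, pvHeadsAux]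
    split_ifs
    · rw [ih, harith]; rfl
    · rw [ih, harith]

-- phase 1 on the table = pvFind1
theorem pvFind1_table (tgt : List Char) : ∀ (rest : List String) (i : Nat),
    ((pvHeadsAux rest (i : Int)).find? (fun e => PySem.Chars.isIn tgt e.2.2)).map (fun e => (e.1, e.2.1))
      = (pvFind1 tgt rest i).map (fun p => ((p.1 : Int), p.2)) := by
  intro rest
  induction rest with
  | nil => intro i; simp [pvHeadsAux, pvFind1]
  | cons l rest ih =>
    intro i
    by_cases hs : PySem.Chars.startswith l.toList ['#'] = true
    · by_cases hm : PySem.Chars.isIn tgt (pvHeadSlugB (PySem.Chars.strip (pvLstripHashB l.toList))) = true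
      · simp [pvHeadsAux, pvFind1, hs, hm]
      · rw [Bool.not_eq_true] at hm
        simp only [pvHeadsAux, pvFind1, hs, if_true, List.find?_cons, hm]
        simpa [hm] using (by rw [show (i : Int) + 1 = ((i + 1 : Nat) : Int) by push_cast; ring]; exact ih (i+1))
    · rw [Bool.not_eq_true] at hs
      simp only [pvHeadsAux, pvFind1, hs]
      simpa using (by rw [show (i : Int) + 1 = ((i + 1 : Nat) : Int) by push_cast; ring]; exact ih (i+1))

-- phase 2 on the table (over the suffix) = pvFind2
theorem pvFind2_table (lvl : Int) (n : Nat) : ∀ (rest : List String) (j : Nat),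
    (match (pvHeadsAux rest (j : Int)).find? (fun e => decide (e.2.1 ≤ lvl)) with
     | some e => e.1
     | none => ((n : Nat) : Int)) = ((pvFind2 lvl n rest j : Nat) : Int) := by
  intro rest
  induction rest with
  | nil => intro j; simp [pvHeadsAux, pvFind2]
  | cons l rest ih =>
    intro j
    by_cases hs : PySem.Chars.startswith l.toList ['#'] = true
    · by_cases hl : ((l.length - (pvLstripHashB l.toList).length : Nat) : Int) ≤ lvl
      · simp [pvHeadsAux, pvFind2, hs, hl]
      · simp only [pvHeadsAux, pvFind2]
        simp [hs, hl]
        rw [show (j : Int) + 1 = ((j + 1 : Nat) : Int) by push_cast; ring, ih (j+1)]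
    · rw [Bool.not_eq_true] at hs
      simp only [pvHeadsAux, pvFind2]
      simp [hs]
      rw [show (j : Int) + 1 = ((j + 1 : Nat) : Int) by push_cast; ring, ih (j+1)]

-- pvFind1's index is within range
theorem pvFind1_lt (tgt : List Char) : ∀ (rest : List String) (i : Nat) (s : Nat) (L : Int),
    pvFind1 tgt rest i = some (s, L) → i ≤ s ∧ s < i + rest.length := by
  intro rest
  induction rest with
  | nil => intro i s L h; simp [pvFind1] at h
  | cons l rest ih =>
    intro i s L h
    simp only [pvFind1] at h
    split_ifs at h
    · simp only [Option.some.injEq, Prod.mk.injEq] at h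
      obtain ⟨h1, -⟩ := h
      simp only [List.length_cons]
      omega
    · have := ih (i+1) s L h; simp only [List.length_cons]; omega
    · have := ih (i+1) s L h; simp only [List.length_cons]; omega

-- in-section phase of A = pvFind2 (invariant: last_content_idx = current index)
theorem pvLoopA_in (sl : List Char) : ∀ (rest : List String) (i : Nat) (lvl : Int),
    pvLoopA sl rest i true lvl (some i) = some (pvFind2 lvl (i + rest.length) rest i) := by
  intro rest
  induction rest with
  | nil => intro i lvl; simp [pvLoopA, pvFind2]
  | cons l rest ih =>
    intro i lvl
    by_cases hs : PySem.Chars.startswith l.toList ['#'] = true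
    · by_cases hl : ((l.length - (pvLstripHashB l.toList).length : Nat) : Int) ≤ lvl
      · simp [pvLoopA, pvFind2, pvLstrip_eq, hs, hl]
      · simp only [pvLoopA, pvFind2, pvLstrip_eq]
        simp [hs, hl]
        rw [ih (i+1) lvl, show i + 1 + rest.length = i + (rest.length + 1) from by omega]
    · rw [Bool.not_eq_true] at hs
      simp only [pvLoopA, pvFind2, pvLstrip_eq]
      simp [hs]
      rw [ih (i+1) lvl, show i + 1 + rest.length = i + (rest.length + 1) from by omega]

-- pre-section phase of A = pvFind1 composed with pvFind2
theorem pvLoopA_pre (sl : List Char) : ∀ (rest : List String) (i : Nat) (lvl : Int),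
    pvLoopA sl rest i false lvl none =
      (match pvFind1 sl rest i with
       | none => none
       | some (s, L) => some (pvFind2 L (i + rest.length) (rest.drop (s + 1 - i)) (s + 1))) := by
  intro rest
  induction rest with
  | nil => intro i lvl; simp [pvLoopA, pvFind1]
  | cons l rest ih =>
    intro i lvl
    by_cases hs : PySem.Chars.startswith l.toList ['#'] = true
    · by_cases hm : PySem.Chars.isIn sl (pvHeadSlugB (PySem.Chars.strip (pvLstripHashB l.toList))) = true
      · -- matching heading at index i: A enters the section, B's phase 1 stops here
        simp only [pvLoopA, pvFind1, pvLstrip_eq, pvSlug_eq]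
        simp [hs, hm]
        rw [pvLoopA_in sl rest (i+1),
            show i + 1 + rest.length = i + (rest.length + 1) from by omega]
      · simp only [pvLoopA, pvFind1, pvLstrip_eq, pvSlug_eq]
        simp [hs, hm]
        rw [ih (i+1) lvl]
        cases hf : pvFind1 sl rest (i+1) with
        | none => rfl
        | some p =>
          obtain ⟨s, L⟩ := p
          have hge := (pvFind1_lt sl rest (i+1) s L hf).1
          simp only
          rw [show s + 1 - i = (s + 1 - (i + 1)) + 1 from by omega, List.drop_succ_cons,
              show i + 1 + rest.length = i + (rest.length + 1) from by omega]
    · rw [Bool.not_eq_true] at hs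
      simp only [pvLoopA, pvFind1, pvLstrip_eq, pvSlug_eq]
      simp [hs]
      rw [ih (i+1) lvl]
      cases hf : pvFind1 sl rest (i+1) with
      | none => rfl
      | some p =>
        obtain ⟨s, L⟩ := p
        have hge := (pvFind1_lt sl rest (i+1) s L hf).1
        simp only
        rw [show s + 1 - i = (s + 1 - (i + 1)) + 1 from by omega, List.drop_succ_cons,
            show i + 1 + rest.length = i + (rest.length + 1) from by omega]

-- find? respects a pointwise-equal predicate on the list's members
theorem pvFind?_congr {α : Type} (l : List α) (p q : α → Bool) (h : ∀ e ∈ l, p e = q e) :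
    l.find? p = l.find? q := by
  induction l with
  | nil => rfl
  | cons x xs ih =>
    simp only [List.find?_cons, h x (List.mem_cons_self)]
    cases q x
    · exact ih (fun e he => h e (List.mem_cons_of_mem _ he))
    · rfl

-- zeta-reduced form of B's port over the recursive table
theorem pvAlt_unfold (lines : List String) (section_name : String) :
    find_section_end_py_alt lines section_name =
      (match (pvHeadsAux lines 0).find? (fun e => PySem.Chars.isIn (pvTargetB section_name) e.2.2) with
       | none => none
       | some (s, level, _) =>
         match (pvHeadsAux lines 0).find? (fun e => decide (s < e.1) && decide (e.2.1 ≤ level)) with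
         | some e => some e.1
         | none => some ((lines.length : Nat) : Int)) := by
  simp only [find_section_end_py_alt, pvHeads_eq]

-- B on the table = pvFind1 composed with pvFind2 (the same intermediate form)
theorem pvAlt_eq (lines : List String) (section_name : String) :
    find_section_end_py_alt lines section_name =
      (match pvFind1 (pvTargetB section_name) lines 0 with
       | none => none
       | some (s, L) => some ((pvFind2 L lines.length (lines.drop (s + 1)) (s + 1) : Nat) : Int)) := by
  rw [pvAlt_unfold]
  have h1 := pvFind1_table (pvTargetB section_name) lines 0
  rw [show ((0 : Nat) : Int) = (0 : Int) from rfl] at h1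
  cases he : (pvHeadsAux lines 0).find? (fun e => PySem.Chars.isIn (pvTargetB section_name) e.2.2) with
  | none =>
    rw [he] at h1
    cases hf : pvFind1 (pvTargetB section_name) lines 0 with
    | none => rfl
    | some p => rw [hf] at h1; simp at h1
  | some e =>
    obtain ⟨si, L, slug'⟩ := e
    rw [he] at h1
    cases hf : pvFind1 (pvTargetB section_name) lines 0 with
    | none => rw [hf] at h1; simp at h1
    | some p =>
      obtain ⟨s, L0⟩ := p
      rw [hf] at h1
      simp only [Option.map_some, Option.some.injEq, Prod.mk.injEq] at h1
      obtain ⟨hsi, hL⟩ := h1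
      subst hsi; subst hL
      -- second query: split the table at line s+1
      have hslt := (pvFind1_lt (pvTargetB section_name) lines 0 s L hf).2
      have htake : (lines.take (s+1)).length = s + 1 := by
        rw [List.length_take]; omega
      have hsplit : pvHeadsAux lines 0 =
          pvHeadsAux (lines.take (s+1)) 0 ++ pvHeadsAux (lines.drop (s+1)) (((s+1 : Nat)) : Int) := by
        conv_lhs => rw [show lines = lines.take (s+1) ++ lines.drop (s+1) from (List.take_append_drop _ _).symm]
        rw [pvHeadsAux_append, htake]
        norm_num
      rw [hsplit]
      -- both outer matches are on literal constructors; reduce them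
      suffices hgoal :
          (match (pvHeadsAux (lines.take (s+1)) 0 ++
                  pvHeadsAux (lines.drop (s+1)) (((s+1 : Nat)) : Int)).find?
              (fun e => decide ((s : Int) < e.1) && decide (e.2.1 ≤ L)) with
           | some e => some e.1
           | none => some ((lines.length : Nat) : Int))
            = some ((pvFind2 L lines.length (lines.drop (s + 1)) (s + 1) : Nat) : Int) by
        exact hgoal
      rw [List.find?_append]
      have hfirst : (pvHeadsAux (lines.take (s+1)) 0).find?
          (fun e => decide ((s : Int) < e.1) && decide (e.2.1 ≤ L)) = none := by
        rw [List.find?_eq_none]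
        intro e hmem
        have hb := pvHeadsAux_bounds (lines.take (s+1)) 0 e hmem
        rw [htake] at hb
        simp only [Bool.and_eq_true, decide_eq_true_eq, not_and]
        intro hlt
        omega
      rw [hfirst, Option.none_or]
      have hcong : (pvHeadsAux (lines.drop (s+1)) (((s+1 : Nat)) : Int)).find?
            (fun e => decide ((s : Int) < e.1) && decide (e.2.1 ≤ L))
          = (pvHeadsAux (lines.drop (s+1)) (((s+1 : Nat)) : Int)).find? (fun e => decide (e.2.1 ≤ L)) := by
        apply pvFind?_congr
        intro e hmem
        have hb := pvHeadsAux_bounds (lines.drop (s+1)) (((s+1 : Nat)) : Int) e hmem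
        have hgt : (s : Int) < e.1 := by
          have := hb.1; push_cast at this; omega
        simp [hgt]
      rw [hcong]
      have h2 := pvFind2_table L lines.length (lines.drop (s+1)) (s+1)
      cases h2' : (pvHeadsAux (lines.drop (s+1)) (((s+1 : Nat)) : Int)).find? (fun e => decide (e.2.1 ≤ L)) with
      | none => rw [h2'] at h2; simpa using h2
      | some e2 => rw [h2'] at h2; simpa using h2

-- ===== VERDICT =====
theorem find_section_end_py_spec : Claim_equal_find_section_end_py := by
  intro lines section_name _
  unfold Spec_find_section_end_py find_section_end_py
  rw [pvTarget_eq, pvLoopA_pre (pvTargetB section_name) lines 0 0, pvAlt_eq]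
  cases hf : pvFind1 (pvTargetB section_name) lines 0 with
  | none => rfl
  | some p =>
    obtain ⟨s, L⟩ := p
    simp
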